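-- pv_equiv track=rewrite | github.com/imawaka-kitagawalab/esrgui | utility_ima/write_sequence.py | create_list_settings
-- ===== SOURCE A (Python) =====
-- def create_list_settings(set):
--     res = []
--     for key, value in set.items():
--         if key[0].isupper():
--             s = key + ' = ' + value
--             res.append(s)
--     res.append('')
--     for key, value in set.items():
--         if key[0].islower():
--             s = key + ' = ' + value
--             res.append(s)
--     res += ['', '']
--     return res
-- ===== SOURCE B (Python) =====
-- def create_list_settings(set):
--     upper = []
--     lower = []
--     for key, value in set.items():
--         c = key[0]
--         if c.isupper():
--             upper.append(key + ' = ' + value)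
--         elif c.islower():
--             lower.append(key + ' = ' + value)
--     return upper + [''] + lower + ['', '']
-- ===== Notes on version B (the rewrite author's own statement) =====
-- stated objective: simpler
-- what changed: Replaces A's two full scans of the dict (one collecting uppercase-initial keys, one lowercase-initial) with a single partitioning pass into two accumulator lists that are concatenated at the end.
import Mathlib
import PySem

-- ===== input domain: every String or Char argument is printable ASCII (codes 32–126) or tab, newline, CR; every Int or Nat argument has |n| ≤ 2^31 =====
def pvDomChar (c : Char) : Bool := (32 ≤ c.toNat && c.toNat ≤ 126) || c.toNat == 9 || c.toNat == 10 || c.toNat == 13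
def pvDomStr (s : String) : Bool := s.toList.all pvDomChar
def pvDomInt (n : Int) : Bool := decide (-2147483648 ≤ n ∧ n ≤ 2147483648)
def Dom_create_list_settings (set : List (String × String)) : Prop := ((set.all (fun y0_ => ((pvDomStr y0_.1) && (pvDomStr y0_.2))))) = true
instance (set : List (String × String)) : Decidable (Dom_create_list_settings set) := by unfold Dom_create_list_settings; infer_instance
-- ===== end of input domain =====

-- B replaces A's two full scans of the dict with a single partitioning pass into two
-- accumulator lists (simpler decomposition, same O(n) cost); return value only.


-- ===== PORT A =====
-- two passes over the items: uppercase-initial keys, a blank line, lowercase-initial keys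
def create_list_settings (set : List (String × String)) : List String :=
  let res : List String := []
  let res := set.foldl (fun res kv =>
    match PySem.Str.pyGet? kv.1 0 with
    | some c => if PySem.Chars.isupper c then res ++ [kv.1 ++ " = " ++ kv.2] else res
    | none => res) res
  let res := res ++ [""]
  let res := set.foldl (fun res kv =>
    match PySem.Str.pyGet? kv.1 0 with
    | some c => if PySem.Chars.islower c then res ++ [kv.1 ++ " = " ++ kv.2] else res
    | none => res) res
  res ++ ["", ""]

-- ===== PORT B =====
-- one pass, partitioning into two accumulators, concatenated at the end
def create_list_settings_alt (set : List (String × String)) : List String :=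
  let p := set.foldl (fun (acc : List String × List String) kv =>
    match PySem.Str.pyGet? kv.1 0 with
    | some c =>
        if PySem.Chars.isupper c then (acc.1 ++ [kv.1 ++ " = " ++ kv.2], acc.2)
        else if PySem.Chars.islower c then (acc.1, acc.2 ++ [kv.1 ++ " = " ++ kv.2])
        else acc
    | none => acc) (([] : List String), ([] : List String))
  p.1 ++ [""] ++ p.2 ++ ["", ""]

-- ===== PRECONDITION & SPEC =====
-- Pre_ excludes items with an empty-string key: there Python's key[0] raises IndexError (in A and in B alike).
def Pre_create_list_settings (set : List (String × String)) : Prop :=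
  ∀ kv ∈ set, kv.1 ≠ ""
instance (set : List (String × String)) : Decidable (Pre_create_list_settings set) := by unfold Pre_create_list_settings; infer_instance

def pvWitness_create_list_settings : (List (String × String)) := [("Name", "taro"), ("size", "3")]

def Spec_create_list_settings (set : List (String × String)) (out : List String) : Prop := out = create_list_settings_alt set
instance (set : List (String × String)) (out : List String) : Decidable (Spec_create_list_settings set out) := by unfold Spec_create_list_settings; infer_instance

-- ===== CLAIM (what is proved, stated in full; the proofs are below) =====
def Claim_equal_create_list_settings : Prop := ∀ (set : List (String × String)), Dom_create_list_settings set → Pre_create_list_settings set → Spec_create_list_settings set (create_list_settings set)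

-- ===== LEMMAS AND PROOFS =====

lemma pv_upper_not_lower (c : Char) (h : PySem.Chars.isupper c = true) :
    PySem.Chars.islower c = false := by
  simp only [PySem.Chars.isupper, Bool.and_eq_true, decide_eq_true_eq] at h
  have hc : ¬ ('a' ≤ c) := fun hc => absurd (le_trans hc h.2) (by decide)
  simp [PySem.Chars.islower, hc]

-- A's lowercase pass is append-shaped: running it from `init` prefixes `init`
lemma pv_stepL_shift (s : List (String × String)) : ∀ init : List String,
    s.foldl (fun res kv =>
      match PySem.Str.pyGet? kv.1 0 with
      | some c => if PySem.Chars.islower c then res ++ [kv.1 ++ " = " ++ kv.2] else res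
      | none => res) init
    = init ++ s.foldl (fun res kv =>
      match PySem.Str.pyGet? kv.1 0 with
      | some c => if PySem.Chars.islower c then res ++ [kv.1 ++ " = " ++ kv.2] else res
      | none => res) [] := by
  induction s with
  | nil => intro init; simp
  | cons kv s ih =>
      intro init
      simp only [List.foldl_cons]
      rw [ih, ih (match PySem.Str.pyGet? kv.1 0 with
        | some c => if PySem.Chars.islower c then [] ++ [kv.1 ++ " = " ++ kv.2] else []
        | none => ([] : List String))]
      cases PySem.Str.pyGet? kv.1 0 with
      | none => simp
      | some c => by_cases h : PySem.Chars.islower c = true <;> simp [h]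

-- B's single pass computes exactly (A's uppercase pass, A's lowercase pass)
lemma pv_core (s : List (String × String)) : ∀ u l : List String,
    s.foldl (fun (acc : List String × List String) kv =>
      match PySem.Str.pyGet? kv.1 0 with
      | some c =>
          if PySem.Chars.isupper c then (acc.1 ++ [kv.1 ++ " = " ++ kv.2], acc.2)
          else if PySem.Chars.islower c then (acc.1, acc.2 ++ [kv.1 ++ " = " ++ kv.2])
          else acc
      | none => acc) (u, l)
    = (s.foldl (fun res kv =>
        match PySem.Str.pyGet? kv.1 0 with
        | some c => if PySem.Chars.isupper c then res ++ [kv.1 ++ " = " ++ kv.2] else res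
        | none => res) u,
       s.foldl (fun res kv =>
        match PySem.Str.pyGet? kv.1 0 with
        | some c => if PySem.Chars.islower c then res ++ [kv.1 ++ " = " ++ kv.2] else res
        | none => res) l) := by
  induction s with
  | nil => intro u l; rfl
  | cons kv s ih =>
      intro u l
      simp only [List.foldl_cons]
      cases PySem.Str.pyGet? kv.1 0 with
      | none => exact ih u l
      | some c =>
          by_cases hU : PySem.Chars.isupper c = true
          · simp only [hU, if_true, pv_upper_not_lower c hU]
            exact ih _ _
          · simp only [hU, Bool.not_eq_true] at *
            by_cases hL : PySem.Chars.islower c = true <;> simp only [hL, if_true] <;>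
              exact ih _ _

-- ===== VERDICT (by name: the statement is the Claim_ definition above) =====
theorem create_list_settings_spec : Claim_equal_create_list_settings := by
  intro set _ _
  unfold Spec_create_list_settings create_list_settings create_list_settings_alt
  dsimp only
  rw [pv_core, pv_stepL_shift]
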